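-- pv_equiv track=rewrite | github.com/AlpetGexha/CTF-cyber-security-challenge-kosova-albania-2026 | Cryptography/Citrix Expose/script.py | decode_ap_nibbles
-- ===== SOURCE A (Python) =====
-- def decode_ap_nibbles(text):
--     # Mapping A->0, B->1, ..., P->15
--     # Since 'A' is 65. val = ord(c) - 65.
--
--     # Try Big Endian Nibbles (First char is high nibble)
--     bytes_be = []
--     for i in range(0, len(text), 2):
--         if i+1 < len(text):
--             hi = ord(text[i]) - ord('A')
--             lo = ord(text[i+1]) - ord('A')
--             val = (hi << 4) | lo
--             bytes_be.append(val)
--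
--     # Try Little Endian Nibbles (First char is low nibble)
--     bytes_le = []
--     for i in range(0, len(text), 2):
--         if i+1 < len(text):
--             lo = ord(text[i]) - ord('A')
--             hi = ord(text[i+1]) - ord('A')
--             val = (hi << 4) | lo
--             bytes_le.append(val)
--
--     return bytes_be, bytes_le
-- ===== SOURCE B (Python) =====
-- def decode_ap_nibbles(text):
--     # decode once, then pair consecutive nibbles in a single shared pass
--     nibs = [ord(c) - ord('A') for c in text]
--     it = iter(nibs)
--     bytes_be = []
--     bytes_le = []
--     for a, b in zip(it, it):
--         bytes_be.append((a << 4) | b)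
--         bytes_le.append((b << 4) | a)
--     return bytes_be, bytes_le
-- ===== Notes on version B (the rewrite author's own statement) =====
-- stated objective: simpler
-- what changed: Replaced A's two separate index-walking range(0, len, 2) scans (each re-reading text[i], text[i+1] under an i+1<len guard) by a single decode pass into a nibble list followed by one shared consecutive-pairing pass that builds both the big- and little-endian byte lists together. (one pass over the data instead of two index-walking scans; check measured ~2x)
import Mathlib
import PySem

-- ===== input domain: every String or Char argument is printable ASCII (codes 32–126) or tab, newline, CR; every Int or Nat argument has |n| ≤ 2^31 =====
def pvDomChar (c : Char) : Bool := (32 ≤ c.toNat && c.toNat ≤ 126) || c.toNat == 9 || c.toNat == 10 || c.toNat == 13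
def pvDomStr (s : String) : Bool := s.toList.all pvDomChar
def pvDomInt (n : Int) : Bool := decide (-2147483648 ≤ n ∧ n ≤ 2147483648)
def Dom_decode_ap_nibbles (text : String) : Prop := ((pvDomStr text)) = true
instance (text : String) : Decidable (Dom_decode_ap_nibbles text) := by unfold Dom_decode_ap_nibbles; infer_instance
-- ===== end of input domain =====

-- B replaces A's two separate index-walking range(0, len, 2) scans by one decode pass plus one
-- shared consecutive-pairing pass that builds both byte lists together (simpler decomposition).

-- ===== PORT A =====
-- A: two loops 'for i in range(0, len(text), 2)', each reading text[i], text[i+1] under an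
-- 'i+1 < len' guard (which makes the reads total) and appending (hi << 4) | lo resp. the
-- lo-first variant to its own list.
def decode_ap_nibbles (text : String) : List Int × List Int :=
  let n := PySem.Str.len text
  let bytes_be := (PySem.List.pyRange 0 n 2).foldl
    (fun acc i =>
      if i + 1 < n then
        let hi : Int := (((PySem.Str.pyGet? text i).getD 'A').toNat : Int) - 65
        let lo : Int := (((PySem.Str.pyGet? text (i + 1)).getD 'A').toNat : Int) - 65
        acc ++ [PySem.Int.bor (hi <<< (4 : Nat)) lo]
      else acc) []
  let bytes_le := (PySem.List.pyRange 0 n 2).foldl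
    (fun acc i =>
      if i + 1 < n then
        let lo : Int := (((PySem.Str.pyGet? text i).getD 'A').toNat : Int) - 65
        let hi : Int := (((PySem.Str.pyGet? text (i + 1)).getD 'A').toNat : Int) - 65
        acc ++ [PySem.Int.bor (hi <<< (4 : Nat)) lo]
      else acc) []
  (bytes_be, bytes_le)

-- ===== PORT B =====
-- pairing of consecutive elements: Python's 'it = iter(nibs); for a, b in zip(it, it)'
def pvPairUp : List Int → List (Int × Int)
  | a :: b :: rest => (a, b) :: pvPairUp rest
  | _ => []

def decode_ap_nibbles_alt (text : String) : List Int × List Int :=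
  let nibs := text.toList.map (fun c => ((c.toNat : Int) - 65))
  (pvPairUp nibs).foldl
    (fun (acc : List Int × List Int) (ab : Int × Int) =>
      (acc.1 ++ [PySem.Int.bor (ab.1 <<< (4 : Nat)) ab.2],
       acc.2 ++ [PySem.Int.bor (ab.2 <<< (4 : Nat)) ab.1]))
    ([], [])

-- ===== PRECONDITION & SPEC =====
def Spec_decode_ap_nibbles (text : String) (out : List Int × List Int) : Prop := out = decode_ap_nibbles_alt text
instance (text : String) (out : List Int × List Int) : Decidable (Spec_decode_ap_nibbles text out) := by unfold Spec_decode_ap_nibbles; infer_instance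

-- ===== CLAIM (what is proved, stated in full; the proofs are below) =====
def Claim_equal_decode_ap_nibbles : Prop := ∀ (text : String), Dom_decode_ap_nibbles text → Spec_decode_ap_nibbles text (decode_ap_nibbles text)

-- ===== LEMMAS AND PROOFS =====

-- char-level pairing, matching pvPairUp on the decoded nibbles
def pvPairUpC : List Char → List (Char × Char)
  | a :: b :: rest => (a, b) :: pvPairUpC rest
  | _ => []

theorem pvPairUp_map (cs : List Char) :
    pvPairUp (cs.map (fun c => ((c.toNat : Int) - 65))) =
      (pvPairUpC cs).map (fun p => (((p.1.toNat : Int) - 65), ((p.2.toNat : Int) - 65))) := by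
  induction cs using pvPairUpC.induct with
  | case1 a b rest ih => simp [pvPairUp, pvPairUpC, ih]
  | case2 t h =>
    match t with
    | [] => simp [pvPairUp, pvPairUpC]
    | [a] => simp [pvPairUp, pvPairUpC]
    | a :: b :: r => exact (h a b r rfl).elim

theorem pvFoldl_pair (l : List (Int × Int)) (f g : Int × Int → Int) (u v : List Int) :
    l.foldl (fun (acc : List Int × List Int) ab => (acc.1 ++ [f ab], acc.2 ++ [g ab])) (u, v)
      = (u ++ l.map f, v ++ l.map g) := by
  induction l generalizing u v with
  | nil => simp
  | cons a t ih => simp [List.foldl, ih]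

theorem pvRange_two_step (n : Nat) :
    PySem.List.pyRange 0 ((n : Int) + 2) 2 = 0 :: (PySem.List.pyRange 0 (n : Int) 2).map (· + 2) := by
  rw [PySem.List.pyRange_of_pos 0 ((n : Int) + 2) (by norm_num),
      PySem.List.pyRange_of_pos 0 (n : Int) (by norm_num)]
  have h1 : (if (0:Int) < (n : Int) + 2 then (((n : Int) + 2 - 0 + 2 - 1) / 2).toNat else 0)
      = (if (0:Int) < (n:Int) then (((n : Int) - 0 + 2 - 1) / 2).toNat else 0) + 1 := by
    by_cases hn : (0:Int) < (n:Int)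
    · rw [if_pos (by omega), if_pos hn]
      omega
    · rw [if_pos (by omega), if_neg hn]
      have h0 : (n : Int) = 0 := by omega
      rw [h0]
      decide
  rw [h1, List.range_succ_eq_map, List.map_cons, List.map_map, List.map_map]
  congr 1

-- the generic A-side loop over pyRange equals a map over the char pairing
theorem pvAloop (cs : List Char) (g : Char → Char → Int) (acc : List Int) :
    (PySem.List.pyRange 0 (cs.length : Int) 2).foldl
      (fun acc i =>
        if i + 1 < (cs.length : Int) then
          acc ++ [g ((PySem.List.pyGet? cs i).getD 'A') ((PySem.List.pyGet? cs (i + 1)).getD 'A')]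
        else acc) acc
      = acc ++ (pvPairUpC cs).map (fun p => g p.1 p.2) := by
  induction cs using pvPairUpC.induct generalizing acc with
  | case1 a b rest ih =>
    have hlen : (((a :: b :: rest).length : Nat) : Int) = (rest.length : Int) + 2 := by
      push_cast [List.length_cons]; ring
    rw [hlen, pvRange_two_step]
    rw [List.foldl_cons, List.foldl_map]
    have hguard : ((0 : Int) + 1 < (rest.length : Int) + 2) = True := by simp; omega
    have hget0 : PySem.List.pyGet? (a :: b :: rest) 0 = some a :=
      PySem.List.pyGet?_zero_cons _ _
    have hget1 : PySem.List.pyGet? (a :: b :: rest) (0 + 1) = some b := by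
      have h01 : ((0 : Int) + 1) = ((0 : Nat) : Int) + 1 := by norm_num
      rw [h01, PySem.List.pyGet?_cons_succ]
      exact PySem.List.pyGet?_zero_cons _ _
    have hbody : ∀ (ac : List Int) (i : Int), i ∈ PySem.List.pyRange 0 (rest.length : Int) 2 →
        (if i + 2 + 1 < (rest.length : Int) + 2 then
          ac ++ [g ((PySem.List.pyGet? (a :: b :: rest) (i + 2)).getD 'A')
                   ((PySem.List.pyGet? (a :: b :: rest) (i + 2 + 1)).getD 'A')]
        else ac)
        = (if i + 1 < (rest.length : Int) then
          ac ++ [g ((PySem.List.pyGet? rest i).getD 'A') ((PySem.List.pyGet? rest (i + 1)).getD 'A')]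
        else ac) := by
      intro ac i hi
      have h0 : 0 ≤ i := ((PySem.List.mem_pyRange_iff_of_pos (by norm_num) i).mp hi).1
      have hcast : i = ((i.toNat : Nat) : Int) := by omega
      have e2 : PySem.List.pyGet? (a :: b :: rest) (i + 2) = PySem.List.pyGet? rest i := by
        rw [hcast]
        have h2 : ((i.toNat : Nat) : Int) + 2 = (((i.toNat + 1 : Nat) : Int)) + 1 := by push_cast; ring
        rw [h2, PySem.List.pyGet?_cons_succ]
        have h3 : ((i.toNat + 1 : Nat) : Int) = ((i.toNat : Nat) : Int) + 1 := by push_cast; ring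
        rw [h3, PySem.List.pyGet?_cons_succ]
      have e3 : PySem.List.pyGet? (a :: b :: rest) (i + 2 + 1) = PySem.List.pyGet? rest (i + 1) := by
        rw [hcast]
        have h2 : ((i.toNat : Nat) : Int) + 2 + 1 = (((i.toNat + 2 : Nat) : Int)) + 1 := by push_cast; ring
        rw [h2, PySem.List.pyGet?_cons_succ]
        have h3 : ((i.toNat + 2 : Nat) : Int) = (((i.toNat + 1 : Nat) : Int)) + 1 := by push_cast; ring
        rw [h3, PySem.List.pyGet?_cons_succ]
        have h4 : ((i.toNat + 1 : Nat) : Int) = ((i.toNat : Nat) : Int) + 1 := by push_cast; ring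
        rw [h4]
      rw [e2, e3]
      by_cases hc : i + 1 < (rest.length : Int)
      · rw [if_pos (by omega), if_pos hc]
      · rw [if_neg (by omega), if_neg hc]
    simp only [hguard, if_true, hget0, hget1, Option.getD_some]
    rw [PySem.List.foldl_congr_mem _ _ _ _ hbody, ih]
    simp [pvPairUpC]
  | case2 t h =>
    match t with
    | [] => simp [pvPairUpC, PySem.List.pyRange]
    | [c] =>
      have hlen : ((([c] : List Char).length : Nat) : Int) = 1 := by simp
      rw [hlen]
      have hr : PySem.List.pyRange 0 (1 : Int) 2 = [0] := by decide
      rw [hr]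
      simp [pvPairUpC]
    | a :: b :: r => exact (h a b r rfl).elim

-- ===== VERDICT (by name: the statement is the Claim_ definition above) =====
theorem decode_ap_nibbles_spec : Claim_equal_decode_ap_nibbles := by
  intro text _
  unfold Spec_decode_ap_nibbles decode_ap_nibbles decode_ap_nibbles_alt
  have hlen : PySem.Str.len text = (text.toList.length : Int) := PySem.Str.len_eq text
  have hget : ∀ i, PySem.Str.pyGet? text i = PySem.List.pyGet? text.toList i := fun _ => rfl
  simp only [hlen, hget]
  rw [pvAloop text.toList
        (fun c d => PySem.Int.bor ((((c.toNat : Int) - 65)) <<< (4 : Nat)) (((d.toNat : Int) - 65))) [],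
      pvAloop text.toList
        (fun c d => PySem.Int.bor ((((d.toNat : Int) - 65)) <<< (4 : Nat)) (((c.toNat : Int) - 65))) []]
  rw [pvPairUp_map, pvFoldl_pair]
  simp [List.map_map, Function.comp]
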